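-- pv_equiv track=rewrite | github.com/agriev/we_sdk_mock | rawg-backend-master/project/apps/games/esrb.py | _get_esrb_rating_mapping
-- ===== SOURCE A (Python) =====
-- def _get_esrb_rating_mapping(require_age):
--     """
--     Using for overriding require age to esrb system rating
--
--     Based on https://www.esrb.org/ratings/ratings_guide.aspx
--     """
--     esbr_rating_value = 'AO'
--     esrb_rating_mapping = {
--         0: 'E',
--         10: 'E10+',
--         13: 'T',
--         17: 'M',
--     }
--
--     for age, esbr_value in esrb_rating_mapping.items():
--         if require_age <= age:
--             return esbr_value
--     return esbr_rating_value
-- ===== SOURCE B (Python) =====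
-- import bisect
--
-- _THRESHOLDS = [0, 10, 13, 17]
-- _RATINGS = ['E', 'E10+', 'T', 'M', 'AO']
--
-- def _get_esrb_rating_mapping(require_age):
--     """
--     Using for overriding require age to esrb system rating
--
--     Based on https://www.esrb.org/ratings/ratings_guide.aspx
--     """
--     return _RATINGS[bisect.bisect_left(_THRESHOLDS, require_age)]
-- ===== Notes on version B (the rewrite author's own statement) =====
-- stated objective: idiomatic
-- what changed: Replaced the linear scan over a dict of thresholds with a binary search (bisect_left) over a parallel threshold/rating table.
import Mathlib
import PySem

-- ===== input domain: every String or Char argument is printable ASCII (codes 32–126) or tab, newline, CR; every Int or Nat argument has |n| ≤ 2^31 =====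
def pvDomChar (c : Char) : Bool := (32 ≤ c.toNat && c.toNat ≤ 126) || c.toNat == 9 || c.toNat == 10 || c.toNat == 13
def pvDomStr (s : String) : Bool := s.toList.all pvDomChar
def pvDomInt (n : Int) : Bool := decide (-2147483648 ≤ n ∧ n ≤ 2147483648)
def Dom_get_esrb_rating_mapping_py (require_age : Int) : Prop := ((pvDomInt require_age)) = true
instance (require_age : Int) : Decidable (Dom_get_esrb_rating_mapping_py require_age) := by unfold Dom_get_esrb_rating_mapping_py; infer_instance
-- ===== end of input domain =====

-- B replaces A's linear scan over the threshold dict with a bisect_left binary search over a parallel table (idiomatic; same cost at this size).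
-- ===== PORT A =====
-- the dict's .items() in insertion order, scanned linearly
def pvEsrbLoopA : List (Int × String) → Int → String
  | [], _ => "AO"                                  -- fall through: return esbr_rating_value
  | (age, v) :: rest, r => if r ≤ age then v else pvEsrbLoopA rest r

def get_esrb_rating_mapping_py (require_age : Int) : String :=
  pvEsrbLoopA [(0, "E"), (10, "E10+"), (13, "T"), (17, "M")] require_age

-- ===== PORT B =====
-- transliteration of bisect.bisect_left's while-loop on a List Int;
-- fuel = hi bounds the number of iterations (the interval shrinks each step)
def pvBisectLeftGo (xs : List Int) (x : Int) : Nat → Nat → Nat → Nat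
  | 0, lo, _ => lo
  | fuel + 1, lo, hi =>
    if lo < hi then
      let mid := (lo + hi) / 2
      if xs.getD mid 0 < x then pvBisectLeftGo xs x fuel (mid + 1) hi
      else pvBisectLeftGo xs x fuel lo mid
    else lo

def get_esrb_rating_mapping_py_alt (require_age : Int) : String :=
  (["E", "E10+", "T", "M", "AO"]).getD
    (pvBisectLeftGo [0, 10, 13, 17] require_age 4 0 4) "AO"

-- ===== PRECONDITION & SPEC =====
def Spec_get_esrb_rating_mapping_py (require_age : Int) (out : String) : Prop := out = get_esrb_rating_mapping_py_alt require_age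
instance (require_age : Int) (out : String) : Decidable (Spec_get_esrb_rating_mapping_py require_age out) := by unfold Spec_get_esrb_rating_mapping_py; infer_instance

-- ===== CLAIM (what is proved, stated in full; the proofs are below) =====
def Claim_equal_get_esrb_rating_mapping_py : Prop := ∀ (require_age : Int), Dom_get_esrb_rating_mapping_py require_age → Spec_get_esrb_rating_mapping_py require_age (get_esrb_rating_mapping_py require_age)

-- ===== LEMMAS AND PROOFS =====

-- ===== VERDICT (by name: the statement is the Claim_ definition above) =====
theorem get_esrb_rating_mapping_py_spec : Claim_equal_get_esrb_rating_mapping_py := by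
  intro r _
  unfold Spec_get_esrb_rating_mapping_py get_esrb_rating_mapping_py get_esrb_rating_mapping_py_alt
  by_cases h0 : r ≤ 0
  · have h13 : ¬ (13 : Int) < r := by omega
    have h10 : ¬ (10 : Int) < r := by omega
    have hz : ¬ (0 : Int) < r := by omega
    simp [pvEsrbLoopA, pvBisectLeftGo, h0, h13, h10, hz]
  · by_cases h10 : r ≤ 10
    · have h13 : ¬ (13 : Int) < r := by omega
      have h10' : ¬ (10 : Int) < r := by omega
      have hz : (0 : Int) < r := by omega
      simp [pvEsrbLoopA, pvBisectLeftGo, h0, h10, h13, h10', hz]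
    · by_cases h13 : r ≤ 13
      · have h13' : ¬ (13 : Int) < r := by omega
        have h10' : (10 : Int) < r := by omega
        simp [pvEsrbLoopA, pvBisectLeftGo, h0, h10, h13, h13', h10']
      · by_cases h17 : r ≤ 17
        · have h13' : (13 : Int) < r := by omega
          have h17' : ¬ (17 : Int) < r := by omega
          simp [pvEsrbLoopA, pvBisectLeftGo, h0, h10, h13, h17, h13', h17']
        · have h13' : (13 : Int) < r := by omega
          have h17' : (17 : Int) < r := by omega
          simp [pvEsrbLoopA, pvBisectLeftGo, h0, h10, h13, h17, h13', h17']
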